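-- pv_equiv track=rewrite | github.com/nownabe/competitive_programming | JOI2011YOE_Cheese.py | search
-- ===== SOURCE A (Python) =====
-- from collections import deque
--
-- DIRECTIONS = [(-1, 0), (1, 0), (0, -1), (0, 1)]
--
-- def search(h, w, n, town, start):
--     time = 0
--
--     for c in range(1, n + 1):
--         todo = deque([start])
--
--         visited = [[False] * w for _ in range(h)]
--         distances = [[None] * w for _ in range(h)]
--
--         visited[start[0]][start[1]] = True
--         distances[start[0]][start[1]] = 0
--
--         while len(todo) != 0:
--             vi, vj = todo.popleft()
--
--             for di, dj in DIRECTIONS: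
--                 wi, wj = (vi + di, vj + dj)
--
--                 if 0 <= wi < h and 0 <= wj < w and town[wi][wj] != 'X':
--                     if visited[wi][wj]:
--                         continue
--
--                     distances[wi][wj] = distances[vi][vj] + 1
--
--                     if town[wi][wj] == str(c):
--                         start = (wi, wj)
--                         time += distances[wi][wj]
--                         todo.clear()
--                         break
--
--                     visited[wi][wj] = True
--                     todo.append((wi, wj))
--
--     return time
-- ===== SOURCE B (Python) =====
-- def search(h, w, n, town, start):
--     total = 0
--     for c in range(1, n + 1):
--         goal = str(c)
--         seen = {start}
--         frontier = [start]
--         d = 0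
--         found = None
--         while frontier and found is None:
--             d += 1
--             nxt = []
--             for vi, vj in frontier:
--                 for di, dj in ((-1, 0), (1, 0), (0, -1), (0, 1)):
--                     wi, wj = vi + di, vj + dj
--                     if 0 <= wi < h and 0 <= wj < w and town[wi][wj] != 'X' and (wi, wj) not in seen:
--                         if town[wi][wj] == goal:
--                             found = (wi, wj)
--                             break
--                         seen.add((wi, wj))
--                         nxt.append((wi, wj))
--                 if found is not None:
--                     break
--             frontier = nxt
--         if found is not None:
--             start = found
--             total += d
--     return total
-- ===== Notes on version B (the rewrite author's own statement) =====
-- stated objective: alternative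
-- what changed: Replaces A's FIFO-deque BFS with per-cell visited/distance 2D arrays rebuilt every leg by a level-synchronous frontier BFS that keeps only a visited set, the next-level list and a level counter (no distance grid, no deque).
-- outside the precondition, e.g. on search(2, 1, 1, [['.'], ['1']], (-1, 0)): A returns 0, B returns 2; on search(2, 1, 1, [['X']], (1, 0)): A returns 0, B returns 0; on search(1, 1, 1, [['1']], (-1, -1)): A returns 0, B returns 0
import Mathlib
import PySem

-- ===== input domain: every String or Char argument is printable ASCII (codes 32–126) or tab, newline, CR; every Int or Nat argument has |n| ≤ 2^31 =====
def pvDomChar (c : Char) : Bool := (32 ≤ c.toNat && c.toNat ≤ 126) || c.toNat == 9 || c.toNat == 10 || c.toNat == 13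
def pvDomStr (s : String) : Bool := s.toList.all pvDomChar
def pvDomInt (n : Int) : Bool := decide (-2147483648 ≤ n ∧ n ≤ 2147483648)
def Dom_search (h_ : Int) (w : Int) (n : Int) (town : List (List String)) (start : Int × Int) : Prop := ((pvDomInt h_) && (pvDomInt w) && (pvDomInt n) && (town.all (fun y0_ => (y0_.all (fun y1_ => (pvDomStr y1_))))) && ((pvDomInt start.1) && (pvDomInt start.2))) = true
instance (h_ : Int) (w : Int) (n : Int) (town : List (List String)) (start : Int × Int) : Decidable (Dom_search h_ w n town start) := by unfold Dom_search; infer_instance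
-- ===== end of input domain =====

-- B replaces A's deque-plus-2D-boolean/distance-arrays BFS by a level-synchronous frontier BFS
-- over a visited set with a level counter (objective: alternative, same asymptotic cost).

-- ===== PORT A =====
def pvDirs : List (Int × Int) := [(-1, 0), (1, 0), (0, -1), (0, 1)]

-- town[i][j] / grid[i][j]; exact for the nonnegative in-range indices the algorithms use under Pre_
def pvCell (town : List (List String)) (i j : Int) : String :=
  (town.getD i.toNat []).getD j.toNat ""

def pvGet2 {α : Type} (m : List (List α)) (d : α) (i j : Int) : α :=
  (m.getD i.toNat []).getD j.toNat d

def pvSet2 {α : Type} (m : List (List α)) (i j : Int) (x : α) : List (List α) :=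
  m.set i.toNat ((m.getD i.toNat []).set j.toNat x)

-- A's inner `for di, dj in DIRECTIONS` loop with its continue/break structure
def pvStepA (h_ w : Int) (town : List (List String)) (goal : String) (vi vj dv : Int) :
    List (Int × Int) → List (Int × Int) → List (List Bool) → List (List (Option Int)) →
    Option ((Int × Int) × Int) × List (Int × Int) × List (List Bool) × List (List (Option Int))
  | [], q, vis, dist => (none, q, vis, dist)
  | (di, dj) :: dirs, q, vis, dist =>
    let wi := vi + di
    let wj := vj + dj
    if 0 ≤ wi ∧ wi < h_ ∧ 0 ≤ wj ∧ wj < w ∧ pvCell town wi wj ≠ "X" then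
      if pvGet2 vis false wi wj then
        pvStepA h_ w town goal vi vj dv dirs q vis dist
      else
        let dist' := pvSet2 dist wi wj (some (dv + 1))
        if pvCell town wi wj = goal then
          -- break: start := (wi,wj), time += distances[wi][wj], todo.clear()
          (some ((wi, wj), (pvGet2 dist' none wi wj).getD 0), q, vis, dist')
        else
          pvStepA h_ w town goal vi vj dv dirs (q ++ [(wi, wj)]) (pvSet2 vis wi wj true) dist'
    else
      pvStepA h_ w town goal vi vj dv dirs q vis dist

-- A's `while len(todo) != 0` loop; fuel only makes the recursion structural (never exhausted under Pre_)
def pvBfsA (h_ w : Int) (town : List (List String)) (goal : String) :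
    Nat → List (Int × Int) → List (List Bool) → List (List (Option Int)) →
    Option ((Int × Int) × Int)
  | 0, _, _, _ => none
  | _ + 1, [], _, _ => none
  | fuel + 1, (vi, vj) :: rest, vis, dist =>
    -- distances[vi][vj] is always set when (vi,vj) is popped; `.getD 0` only totalises the read
    let dv := (pvGet2 dist none vi vj).getD 0
    match pvStepA h_ w town goal vi vj dv pvDirs rest vis dist with
    | (some r, _, _, _) => some r
    | (none, q', vis', dist') => pvBfsA h_ w town goal fuel q' vis' dist'

-- one iteration of A's `for c in range(1, n+1)` loop; state = (start, time)
def pvIterA (h_ w : Int) (town : List (List String)) (st : (Int × Int) × Int) (c : Int) :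
    (Int × Int) × Int :=
  let s := st.1
  let vis0 := pvSet2 (List.replicate h_.toNat (List.replicate w.toNat false)) s.1 s.2 true
  let dist0 := pvSet2 (List.replicate h_.toNat (List.replicate w.toNat (none : Option Int))) s.1 s.2 (some 0)
  match pvBfsA h_ w town (PySem.Int.toStr c) (h_.toNat * w.toNat + 1) [s] vis0 dist0 with
  | some (cell, dd) => (cell, st.2 + dd)
  | none => st

def search (h_ : Int) (w : Int) (n : Int) (town : List (List String)) (start : Int × Int) : Int :=
  ((PySem.List.pyRange 1 (n + 1) 1).foldl (pvIterA h_ w town) (start, 0)).2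

-- ===== PORT B =====
-- B's inner `for di, dj in …` loop over one frontier cell; seen is a Python set, nxt the next level
def pvStepB (h_ w : Int) (town : List (List String)) (goal : String) (vi vj : Int) :
    List (Int × Int) → PySem.Set (Int × Int) → List (Int × Int) →
    Option (Int × Int) × PySem.Set (Int × Int) × List (Int × Int)
  | [], seen, nxt => (none, seen, nxt)
  | (di, dj) :: dirs, seen, nxt =>
    let wi := vi + di
    let wj := vj + dj
    if 0 ≤ wi ∧ wi < h_ ∧ 0 ≤ wj ∧ wj < w ∧ pvCell town wi wj ≠ "X" ∧
        PySem.Set.contains seen (wi, wj) = false then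
      if pvCell town wi wj = goal then
        (some (wi, wj), seen, nxt)
      else
        pvStepB h_ w town goal vi vj dirs (PySem.Set.add seen (wi, wj)) (nxt ++ [(wi, wj)])
    else
      pvStepB h_ w town goal vi vj dirs seen nxt

-- B's `for vi, vj in frontier` loop (breaks as soon as found)
def pvLevelB (h_ w : Int) (town : List (List String)) (goal : String) :
    List (Int × Int) → PySem.Set (Int × Int) → List (Int × Int) →
    Option (Int × Int) × PySem.Set (Int × Int) × List (Int × Int)
  | [], seen, nxt => (none, seen, nxt)
  | (vi, vj) :: vs, seen, nxt =>
    match pvStepB h_ w town goal vi vj pvDirs seen nxt with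
    | (some f, seen', nxt') => (some f, seen', nxt')
    | (none, seen', nxt') => pvLevelB h_ w town goal vs seen' nxt'

-- B's `while frontier and found is None` loop; d is the level counter; fuel only structural
def pvBfsB (h_ w : Int) (town : List (List String)) (goal : String) :
    Nat → List (Int × Int) → PySem.Set (Int × Int) → Int → Option ((Int × Int) × Int)
  | 0, _, _, _ => none
  | _ + 1, [], _, _ => none
  | fuel + 1, v :: vs, seen, d =>
    match pvLevelB h_ w town goal (v :: vs) seen [] with
    | (some f, _, _) => some (f, d + 1)
    | (none, seen', nxt) => pvBfsB h_ w town goal fuel nxt seen' (d + 1)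

-- one iteration of B's `for c in range(1, n+1)` loop; state = (start, total)
def pvIterB (h_ w : Int) (town : List (List String)) (st : (Int × Int) × Int) (c : Int) :
    (Int × Int) × Int :=
  let s := st.1
  match pvBfsB h_ w town (PySem.Int.toStr c) (h_.toNat * w.toNat + 1) [s]
      (PySem.Set.ofList [s]) 0 with
  | some (cell, dd) => (cell, st.2 + dd)
  | none => st

def search_alt (h_ : Int) (w : Int) (n : Int) (town : List (List String)) (start : Int × Int) : Int :=
  ((PySem.List.pyRange 1 (n + 1) 1).foldl (pvIterB h_ w town) (start, 0)).2

-- ===== PRECONDITION & SPEC =====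
-- Pre_ excludes (when the loop runs at all, i.e. n ≥ 1) starts outside the h×w grid — there A's value
-- rests on Python's negative-index wraparound pre-marking a wrapped cell of the visited/distance arrays,
-- an artefact of A's array bookkeeping — and grids with fewer than h rows or rows shorter than w, on
-- which A raises IndexError whenever the search touches a missing cell.
def Pre_search (h_ : Int) (w : Int) (n : Int) (town : List (List String)) (start : Int × Int) : Prop :=
  n ≤ 0 ∨
    (0 ≤ start.1 ∧ start.1 < h_ ∧ 0 ≤ start.2 ∧ start.2 < w ∧
     h_ ≤ (town.length : Int) ∧ ∀ row ∈ town.take h_.toNat, w ≤ (row.length : Int))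
instance (h_ : Int) (w : Int) (n : Int) (town : List (List String)) (start : Int × Int) : Decidable (Pre_search h_ w n town start) := by unfold Pre_search; infer_instance

def pvWitness_search : Int × Int × Int × List (List String) × (Int × Int) :=
  (2, 2, 1, [[".", "1"], ["S", "X"]], (0, 0))

def Spec_search (h_ : Int) (w : Int) (n : Int) (town : List (List String)) (start : Int × Int) (out : Int) : Prop := out = search_alt h_ w n town start
instance (h_ : Int) (w : Int) (n : Int) (town : List (List String)) (start : Int × Int) (out : Int) : Decidable (Spec_search h_ w n town start out) := by unfold Spec_search; infer_instance

-- ===== CLAIM (what is proved, stated in full; the proofs are below) =====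
def Claim_equal_search : Prop := ∀ (h_ : Int) (w : Int) (n : Int) (town : List (List String)) (start : Int × Int), Dom_search h_ w n town start → Pre_search h_ w n town start → Spec_search h_ w n town start (search h_ w n town start)

-- ===== LEMMAS AND PROOFS =====

-- (i,j) lies in the h×w grid
def pvInR (h_ w : Int) (p : Int × Int) : Prop :=
  0 ≤ p.1 ∧ p.1 < h_ ∧ 0 ≤ p.2 ∧ p.2 < w

-- m is an a×b matrix
def pvShape {α : Type} (a b : Nat) (m : List (List α)) : Prop :=
  m.length = a ∧ ∀ row ∈ m, row.length = b

-- the boolean grid vis marks exactly the members of seen (on in-range cells)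
def pvSeenInv (h_ w : Int) (seen : PySem.Set (Int × Int)) (vis : List (List Bool)) : Prop :=
  ∀ i j : Int, pvInR h_ w (i, j) → pvGet2 vis false i j = PySem.Set.contains seen (i, j)

theorem pvContains_true {s : PySem.Set (Int × Int)} {x : Int × Int} (h : x ∈ s) :
    PySem.Set.contains s x = true := by
  simpa [PySem.Set.contains] using h

theorem pvContains_false {s : PySem.Set (Int × Int)} {x : Int × Int} (h : x ∉ s) :
    PySem.Set.contains s x = false := by
  simpa [PySem.Set.contains] using h

theorem pvNotMem_of_contains_false {s : PySem.Set (Int × Int)} {x : Int × Int}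
    (h : PySem.Set.contains s x = false) : x ∉ s := by
  intro hm
  rw [pvContains_true hm] at h
  cases h

theorem pvShape_set2 {α : Type} {a b : Nat} {m : List (List α)} {i j : Int} {x : α}
    (hm : pvShape a b m) (hi : i.toNat < a) : pvShape a b (pvSet2 m i j x) := by
  obtain ⟨hlen, hrow⟩ := hm
  refine ⟨by simp [pvSet2, hlen], ?_⟩
  intro row hr
  rcases List.mem_or_eq_of_mem_set hr with h | h
  · exact hrow _ h
  · subst h
    rw [List.length_set]
    have hi' : i.toNat < m.length := by omega
    have : m.getD i.toNat [] = m[i.toNat] := by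
      simp [List.getD_eq_getElem?_getD, List.getElem?_eq_getElem hi']
    rw [this]
    exact hrow _ (List.getElem_mem hi')

theorem pvGetD_set_self {α : Type} (l : List α) (n : Nat) (a d : α) (h : n < l.length) :
    (l.set n a).getD n d = a := by
  simp [List.getD_eq_getElem?_getD, h]

theorem pvGetD_set_ne {α : Type} (l : List α) (n m' : Nat) (a d : α) (h : n ≠ m') :
    (l.set n a).getD m' d = l.getD m' d := by
  simp [List.getD_eq_getElem?_getD, h]

theorem pvGet2_set2 {α : Type} {a b : Nat} {h_ w : Int} {m : List (List α)} {d x : α}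
    {i j i' j' : Int} (hm : pvShape a b m) (ha : a = h_.toNat) (hb : b = w.toNat)
    (hij : pvInR h_ w (i, j)) (hij' : pvInR h_ w (i', j')) :
    pvGet2 (pvSet2 m i j x) d i' j' = if i' = i ∧ j' = j then x else pvGet2 m d i' j' := by
  obtain ⟨hlen, hrow⟩ := hm
  obtain ⟨hi1, hi2, hj1, hj2⟩ := hij
  obtain ⟨hi1', hi2', hj1', hj2'⟩ := hij'
  have hi : i.toNat < m.length := by omega
  have hrl : (m.getD i.toNat []).length = b := by
    have : m.getD i.toNat [] = m[i.toNat] := by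
      simp [List.getD_eq_getElem?_getD, List.getElem?_eq_getElem hi]
    rw [this]
    exact hrow _ (List.getElem_mem hi)
  by_cases hii : i' = i
  · have hiN : i'.toNat = i.toNat := by rw [hii]
    unfold pvGet2 pvSet2
    rw [hiN, pvGetD_set_self m i.toNat _ _ hi]
    by_cases hjj : j' = j
    · have hjN : j'.toNat = j.toNat := by rw [hjj]
      rw [if_pos ⟨hii, hjj⟩, hjN]
      exact pvGetD_set_self _ j.toNat _ _ (by omega)
    · rw [if_neg (by tauto)]
      exact pvGetD_set_ne _ j.toNat j'.toNat _ _ (by omega)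
  · have hiN : i.toNat ≠ i'.toNat := by omega
    unfold pvGet2 pvSet2
    rw [pvGetD_set_ne m i.toNat i'.toNat _ _ hiN, if_neg (by tauto)]

theorem pvGet2_replicate {α : Type} (a b : Nat) (d x : α) (i j : Int) :
    pvGet2 (List.replicate a (List.replicate b x)) d i j
      = if i.toNat < a ∧ j.toNat < b then x else d := by
  unfold pvGet2
  by_cases hi : i.toNat < a
  · have : (List.replicate a (List.replicate b x)).getD i.toNat [] = List.replicate b x := by
      simp [List.getD_eq_getElem?_getD, hi]
    rw [this]
    by_cases hj : j.toNat < b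
    · rw [if_pos ⟨hi, hj⟩]
      simp [List.getD_eq_getElem?_getD, hj]
    · rw [if_neg (by tauto)]
      simp [List.getD_eq_getElem?_getD, hj]
  · have : (List.replicate a (List.replicate b x)).getD i.toNat [] = [] := by
      simp [List.getD_eq_getElem?_getD, hi]
    rw [this, if_neg (by tauto)]
    simp

theorem pvLen_le_card {h_ w : Int} {l : List (Int × Int)} (hn : l.Nodup)
    (hin : ∀ p ∈ l, pvInR h_ w p) : l.length ≤ h_.toNat * w.toNat := by
  have h1 : l.toFinset.card = l.length := List.toFinset_card_of_nodup hn
  have h2 : l.toFinset ⊆ (Finset.Ico (0 : Int) h_) ×ˢ (Finset.Ico (0 : Int) w) := by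
    intro p hp
    obtain ⟨a1, a2, a3, a4⟩ := hin p (List.mem_toFinset.mp hp)
    rw [Finset.mem_product, Finset.mem_Ico, Finset.mem_Ico]
    exact ⟨⟨a1, a2⟩, a3, a4⟩
  have h3 := Finset.card_le_card h2
  rw [h1, Finset.card_product, Int.card_Ico, Int.card_Ico] at h3
  simpa using h3

-- one frontier cell: A's direction scan and B's direction scan simulate each other
theorem pvStep_sim (h_ w : Int) (town : List (List String)) (goal : String) (vi vj d : Int)
    (dirs : List (Int × Int)) :
    ∀ (q nxt : List (Int × Int)) (vis : List (List Bool)) (dist : List (List (Option Int)))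
      (seen : PySem.Set (Int × Int)),
    pvShape h_.toNat w.toNat vis → pvShape h_.toNat w.toNat dist →
    pvSeenInv h_ w seen vis → seen.Nodup → (∀ p ∈ seen, pvInR h_ w p) →
    ∃ (delta : List (Int × Int)) (vis' : List (List Bool)) (dist' : List (List (Option Int)))
      (res : Option (Int × Int)),
      pvStepA h_ w town goal vi vj d dirs q vis dist
        = (res.map (fun c => (c, d + 1)), q ++ delta, vis', dist') ∧
      pvStepB h_ w town goal vi vj dirs seen nxt = (res, seen ++ delta, nxt ++ delta) ∧
      (∀ c, res = some c → pvInR h_ w c) ∧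
      (res = none →
        pvShape h_.toNat w.toNat vis' ∧ pvShape h_.toNat w.toNat dist' ∧
        pvSeenInv h_ w (seen ++ delta) vis' ∧ (seen ++ delta).Nodup ∧
        (∀ p ∈ seen ++ delta, pvInR h_ w p) ∧
        (∀ p ∈ delta, pvGet2 dist' none p.1 p.2 = some (d + 1)) ∧
        (∀ p ∈ seen, pvGet2 dist' none p.1 p.2 = pvGet2 dist none p.1 p.2)) := by
  induction dirs with
  | nil =>
    intro q nxt vis dist seen hv hd hs hu hr
    refine ⟨[], vis, dist, none, ?_, ?_, ?_, ?_⟩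
    · simp [pvStepA]
    · simp [pvStepB]
    · intro c hc
      cases hc
    intro _
    simp only [List.append_nil]
    refine ⟨hv, hd, hs, hu, hr, ?_, ?_⟩
    · intro p hp
      exact absurd hp (by simp)
    · intro p hp
      trivial
  | cons dij dirs ih =>
    obtain ⟨di, dj⟩ := dij
    intro q nxt vis dist seen hv hd hs hu hr
    by_cases hca : 0 ≤ vi + di ∧ vi + di < h_ ∧ 0 ≤ vj + dj ∧ vj + dj < w ∧
        pvCell town (vi + di) (vj + dj) ≠ "X"
    · have hinr : pvInR h_ w (vi + di, vj + dj) :=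
        ⟨hca.1, hca.2.1, hca.2.2.1, hca.2.2.2.1⟩
      by_cases hvis : pvGet2 vis false (vi + di) (vj + dj) = true
      · -- already visited: A continues, B's condition is false
        have hcont : PySem.Set.contains seen (vi + di, vj + dj) = true := by
          rw [← hs _ _ hinr]; exact hvis
        have hA : pvStepA h_ w town goal vi vj d ((di, dj) :: dirs) q vis dist
            = pvStepA h_ w town goal vi vj d dirs q vis dist := by
          simp only [pvStepA]
          rw [if_pos hca, if_pos hvis]
        have hB : pvStepB h_ w town goal vi vj ((di, dj) :: dirs) seen nxt
            = pvStepB h_ w town goal vi vj dirs seen nxt := by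
          simp only [pvStepB]
          have hfalse : ¬(0 ≤ vi + di ∧ vi + di < h_ ∧ 0 ≤ vj + dj ∧ vj + dj < w ∧
              pvCell town (vi + di) (vj + dj) ≠ "X" ∧
              PySem.Set.contains seen (vi + di, vj + dj) = false) := by
            intro hcb2
            have hx := hcb2.2.2.2.2.2
            rw [hcont] at hx
            cases hx
          rw [if_neg hfalse]
        rw [hA, hB]
        exact ih q nxt vis dist seen hv hd hs hu hr
      · have hvisf : pvGet2 vis false (vi + di) (vj + dj) = false := by
          cases hvb : pvGet2 vis false (vi + di) (vj + dj) with
          | true => exact absurd hvb hvis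
          | false => rfl
        have hcont : PySem.Set.contains seen (vi + di, vj + dj) = false := by
          rw [← hs _ _ hinr]; exact hvisf
        have hnm : (vi + di, vj + dj) ∉ seen := pvNotMem_of_contains_false hcont
        have hcb : 0 ≤ vi + di ∧ vi + di < h_ ∧ 0 ≤ vj + dj ∧ vj + dj < w ∧
            pvCell town (vi + di) (vj + dj) ≠ "X" ∧
            PySem.Set.contains seen (vi + di, vj + dj) = false :=
          ⟨hca.1, hca.2.1, hca.2.2.1, hca.2.2.2.1, hca.2.2.2.2, hcont⟩
        by_cases hg : pvCell town (vi + di) (vj + dj) = goal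
        · -- goal found on this neighbour
          have hread : pvGet2 (pvSet2 dist (vi + di) (vj + dj) (some (d + 1))) none
              (vi + di) (vj + dj) = some (d + 1) := by
            rw [pvGet2_set2 hd rfl rfl hinr hinr]; simp
          refine ⟨[], vis, pvSet2 dist (vi + di) (vj + dj) (some (d + 1)),
            some (vi + di, vj + dj), ?_, ?_, ?_, ?_⟩
          · simp only [pvStepA]
            rw [if_pos hca, if_neg hvis, if_pos hg, hread]
            simp
          · simp only [pvStepB]
            rw [if_pos hcb, if_pos hg]
            simp
          · intro cc hcc
            cases hcc
            exact hinr
          · intro hnone; cases hnone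
        · -- fresh non-goal neighbour: both record it and continue
          have hv' : pvShape h_.toNat w.toNat (pvSet2 vis (vi + di) (vj + dj) true) :=
            pvShape_set2 hv (by omega)
          have hd' : pvShape h_.toNat w.toNat (pvSet2 dist (vi + di) (vj + dj) (some (d + 1))) :=
            pvShape_set2 hd (by omega)
          have hadd : PySem.Set.add seen (vi + di, vj + dj) = seen ++ [(vi + di, vj + dj)] := by
            simp [PySem.Set.add, hnm]
          have hs' : pvSeenInv h_ w (seen ++ [(vi + di, vj + dj)])
              (pvSet2 vis (vi + di) (vj + dj) true) := by
            intro i j hij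
            rw [pvGet2_set2 hv rfl rfl hinr hij]
            by_cases hc : i = vi + di ∧ j = vj + dj
            · rw [if_pos hc]
              symm
              apply pvContains_true
              rw [hc.1, hc.2]
              simp
            · rw [if_neg hc, hs i j hij]
              have hne : ((i, j) : Int × Int) ≠ (vi + di, vj + dj) := by
                intro he
                exact hc ⟨congrArg Prod.fst he, congrArg Prod.snd he⟩
              by_cases hmem : ((i, j) : Int × Int) ∈ seen
              · rw [pvContains_true hmem, pvContains_true (by simp [hmem])]
              · rw [pvContains_false hmem, pvContains_false (by simp [hmem, hne])]
          have hu' : (seen ++ [(vi + di, vj + dj)]).Nodup := by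
            refine List.Nodup.append hu (by simp) ?_
            intro a ha hb
            rw [List.mem_singleton] at hb
            subst hb
            exact hnm ha
          have hr' : ∀ p ∈ seen ++ [(vi + di, vj + dj)], pvInR h_ w p := by
            intro p hp
            rcases List.mem_append.mp hp with h | h
            · exact hr p h
            · rw [List.mem_singleton] at h
              subst h
              exact hinr
          obtain ⟨delta, vis', dist', res, hA, hB, hres, hrest⟩ :=
            ih (q ++ [(vi + di, vj + dj)]) (nxt ++ [(vi + di, vj + dj)])
              (pvSet2 vis (vi + di) (vj + dj) true)
              (pvSet2 dist (vi + di) (vj + dj) (some (d + 1)))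
              (seen ++ [(vi + di, vj + dj)]) hv' hd' hs' hu' hr'
          refine ⟨(vi + di, vj + dj) :: delta, vis', dist', res, ?_, ?_, hres, ?_⟩
          · simp only [pvStepA]
            rw [if_pos hca, if_neg hvis, if_neg hg, hA]
            simp
          · simp only [pvStepB]
            rw [if_pos hcb, if_neg hg, hadd, hB]
            simp
          · intro hres0
            obtain ⟨hv2, hd2, hs2, hu2, hr2, hdd2, hpres2⟩ := hrest hres0
            have hass : seen ++ (vi + di, vj + dj) :: delta
                = (seen ++ [(vi + di, vj + dj)]) ++ delta := by simp
            refine ⟨hv2, hd2, by rw [hass]; exact hs2, by rw [hass]; exact hu2,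
              by rw [hass]; exact hr2, ?_, ?_⟩
            · intro p hp
              rcases List.mem_cons.mp hp with h | h
              · subst h
                rw [hpres2 _ (by simp)]
                rw [pvGet2_set2 hd rfl rfl hinr hinr]
                simp
              · exact hdd2 p h
            · intro p hp
              obtain ⟨p1, p2⟩ := p
              have hpin := hr _ hp
              have hpne : ¬(p1 = vi + di ∧ p2 = vj + dj) := by
                intro he
                apply hnm
                rw [← he.1, ← he.2]
                exact hp
              rw [hpres2 _ (by simp [hp])]
              rw [pvGet2_set2 hd rfl rfl hinr hpin]
              rw [if_neg hpne]
    · -- out of bounds or a wall: both skip this direction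
      have hA : pvStepA h_ w town goal vi vj d ((di, dj) :: dirs) q vis dist
          = pvStepA h_ w town goal vi vj d dirs q vis dist := by
        simp only [pvStepA]
        rw [if_neg hca]
      have hB : pvStepB h_ w town goal vi vj ((di, dj) :: dirs) seen nxt
          = pvStepB h_ w town goal vi vj dirs seen nxt := by
        simp only [pvStepB]
        rw [if_neg (fun hcb => hca ⟨hcb.1, hcb.2.1, hcb.2.2.1, hcb.2.2.2.1, hcb.2.2.2.2.1⟩)]
      rw [hA, hB]
      exact ih q nxt vis dist seen hv hd hs hu hr

-- the main simulation: A's queue is always (remaining current level) ++ (next level)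
theorem pvLevel_sim (h_ w : Int) (town : List (List String)) (goal : String) :
    ∀ (fB : Nat) (q1 : List (Int × Int)) (fA : Nat) (nxt : List (Int × Int))
      (vis : List (List Bool)) (dist : List (List (Option Int)))
      (seen : PySem.Set (Int × Int)) (d : Int),
    pvShape h_.toNat w.toNat vis → pvShape h_.toNat w.toNat dist →
    pvSeenInv h_ w seen vis → seen.Nodup → (∀ p ∈ seen, pvInR h_ w p) →
    (∀ p ∈ q1, p ∈ seen) → (∀ p ∈ nxt, p ∈ seen) →
    (∀ p ∈ q1, pvGet2 dist none p.1 p.2 = some d) →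
    (∀ p ∈ nxt, pvGet2 dist none p.1 p.2 = some (d + 1)) →
    fA ≥ q1.length + nxt.length + (h_.toNat * w.toNat - seen.length) + 1 →
    fB ≥ (h_.toNat * w.toNat - seen.length) + nxt.length + 1 →
    (pvBfsA h_ w town goal fA (q1 ++ nxt) vis dist
       = match pvLevelB h_ w town goal q1 seen nxt with
         | (some f, _, _) => some (f, d + 1)
         | (none, seen', nxt') => pvBfsB h_ w town goal fB nxt' seen' (d + 1)) ∧
    (∀ f dd, pvBfsA h_ w town goal fA (q1 ++ nxt) vis dist = some (f, dd) → pvInR h_ w f) := by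
  intro fB
  induction fB with
  | zero =>
    intro q1 fA nxt vis dist seen d hv hd hs hu hr hq1s hnxts hq1d hnxtd hfa hfb
    omega
  | succ fB ihB =>
    intro q1
    induction q1 with
    | nil =>
      intro fA nxt vis dist seen d hv hd hs hu hr hq1s hnxts hq1d hnxtd hfa hfb
      cases nxt with
      | nil =>
        constructor
        · have hA : pvBfsA h_ w town goal fA (([] : List (Int × Int)) ++ []) vis dist = none := by
            cases fA <;> simp [pvBfsA]
          rw [hA]
          simp [pvLevelB, pvBfsB]
        · intro f dd hsome
          rw [show (([] : List (Int × Int)) ++ []) = [] from rfl] at hsome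
          cases fA <;> simp [pvBfsA] at hsome
      | cons c ctl =>
        have hrec := ihB (c :: ctl) fA [] vis dist seen (d + 1) hv hd hs hu hr hnxts
          (by simp) hnxtd (by simp)
          (by simp at hfa ⊢; omega) (by simp at hfb ⊢; omega)
        obtain ⟨heq, hinr⟩ := hrec
        rw [List.append_nil] at heq hinr
        constructor
        · rw [List.nil_append, heq]
          simp only [pvLevelB, pvBfsB]
        · intro f dd hsome
          rw [List.nil_append] at hsome
          exact hinr f dd hsome
    | cons p cs ihq =>
      obtain ⟨vi, vj⟩ := p
      intro fA nxt vis dist seen d hv hd hs hu hr hq1s hnxts hq1d hnxtd hfa hfb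
      cases fA with
      | zero => simp at hfa
      | succ fA =>
        have hdv : pvGet2 dist none vi vj = some d := hq1d (vi, vj) (by simp)
        obtain ⟨delta, vis', dist', res, hA, hB, hres, hrest⟩ :=
          pvStep_sim h_ w town goal vi vj d pvDirs (cs ++ nxt) nxt vis dist seen hv hd hs hu hr
        have hunf : pvBfsA h_ w town goal (fA + 1) (((vi, vj) :: cs) ++ nxt) vis dist
            = match pvStepA h_ w town goal vi vj ((pvGet2 dist none vi vj).getD 0) pvDirs
                (cs ++ nxt) vis dist with
              | (some r, _, _, _) => some r
              | (none, q', vis2, dist2) => pvBfsA h_ w town goal fA q' vis2 dist2 := by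
          rw [List.cons_append]
          simp only [pvBfsA]
        rw [hdv] at hunf
        simp only [Option.getD_some] at hunf
        rw [hA] at hunf
        cases res with
        | some f =>
          simp only [Option.map_some] at hunf
          constructor
          · rw [hunf]
            simp only [pvLevelB]
            rw [hB]
          · intro f' dd hsome
            rw [hunf] at hsome
            cases hsome
            exact hres f rfl
        | none =>
          simp only [Option.map_none] at hunf
          obtain ⟨hv2, hd2, hs2, hu2, hr2, hdd2, hpres2⟩ := hrest rfl
          have hlen2 : (seen ++ delta).length ≤ h_.toNat * w.toNat := pvLen_le_card hu2 hr2
          have hcs : ∀ p' ∈ cs, p' ∈ seen ++ delta := by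
            intro p' hp'
            exact List.mem_append.mpr (Or.inl (hq1s p' (by simp [hp'])))
          have hnd : ∀ p' ∈ nxt ++ delta, p' ∈ seen ++ delta := by
            intro p' hp'
            rcases List.mem_append.mp hp' with h | h
            · exact List.mem_append.mpr (Or.inl (hnxts p' h))
            · exact List.mem_append.mpr (Or.inr h)
          have hcsd : ∀ p' ∈ cs, pvGet2 dist' none p'.1 p'.2 = some d := by
            intro p' hp'
            rw [hpres2 p' (hq1s p' (by simp [hp']))]
            exact hq1d p' (by simp [hp'])
          have hndd : ∀ p' ∈ nxt ++ delta, pvGet2 dist' none p'.1 p'.2 = some (d + 1) := by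
            intro p' hp'
            rcases List.mem_append.mp hp' with h | h
            · rw [hpres2 p' (hnxts p' h)]
              exact hnxtd p' h
            · exact hdd2 p' h
          have hrec := ihq fA (nxt ++ delta) vis' dist' (seen ++ delta) d hv2 hd2 hs2 hu2 hr2
            hcs hnd hcsd hndd
            (by
              simp only [List.length_append] at hlen2 ⊢
              simp only [List.length_cons] at hfa
              omega)
            (by
              simp only [List.length_append] at hlen2 ⊢
              omega)
          obtain ⟨heq, hinr⟩ := hrec
          rw [← List.append_assoc] at heq hinr
          constructor
          · rw [hunf, heq]
            simp only [pvLevelB]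
            rw [hB]
          · intro f dd hsome
            rw [hunf] at hsome
            exact hinr f dd hsome

-- one outer iteration: the two BFS runs agree and keep the new start in range
theorem pvIter_sim (h_ w : Int) (town : List (List String)) (c : Int)
    (st : (Int × Int) × Int) (hst : pvInR h_ w st.1) :
    pvIterA h_ w town st c = pvIterB h_ w town st c ∧ pvInR h_ w (pvIterA h_ w town st c).1 := by
  obtain ⟨⟨s1, s2⟩, t⟩ := st
  obtain ⟨h1x, h2x, h3x, h4x⟩ := hst
  have h1 : (0 : Int) ≤ s1 := h1x
  have h2 : s1 < h_ := h2x
  have h3 : (0 : Int) ≤ s2 := h3x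
  have h4 : s2 < w := h4x
  have hab : 0 < h_.toNat * w.toNat := Nat.mul_pos (by omega) (by omega)
  have hrepb : pvShape h_.toNat w.toNat
      (List.replicate h_.toNat (List.replicate w.toNat false)) := by
    refine ⟨by simp, ?_⟩
    intro r hr
    rw [List.eq_of_mem_replicate hr]
    simp
  have hrepo : pvShape h_.toNat w.toNat
      (List.replicate h_.toNat (List.replicate w.toNat (none : Option Int))) := by
    refine ⟨by simp, ?_⟩
    intro r hr
    rw [List.eq_of_mem_replicate hr]
    simp
  have hsInR : pvInR h_ w ((s1 : Int), (s2 : Int)) := ⟨h1, h2, h3, h4⟩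
  have hvshape : pvShape h_.toNat w.toNat
      (pvSet2 (List.replicate h_.toNat (List.replicate w.toNat false)) s1 s2 true) :=
    pvShape_set2 hrepb (by omega)
  have hdshape : pvShape h_.toNat w.toNat
      (pvSet2 (List.replicate h_.toNat (List.replicate w.toNat (none : Option Int))) s1 s2
        (some 0)) :=
    pvShape_set2 hrepo (by omega)
  have hseen : pvSeenInv h_ w [((s1 : Int), (s2 : Int))]
      (pvSet2 (List.replicate h_.toNat (List.replicate w.toNat false)) s1 s2 true) := by
    intro i j hij
    rw [pvGet2_set2 hrepb rfl rfl hsInR hij, pvGet2_replicate]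
    obtain ⟨g1, g2, g3, g4⟩ := hij
    rw [if_pos (⟨by omega, by omega⟩ : i.toNat < h_.toNat ∧ j.toNat < w.toNat)]
    by_cases hc : i = s1 ∧ j = s2
    · rw [if_pos hc]
      symm
      apply pvContains_true
      rw [hc.1, hc.2]
      simp
    · rw [if_neg hc]
      symm
      apply pvContains_false
      simp only [List.mem_singleton]
      intro he
      exact hc ⟨congrArg Prod.fst he, congrArg Prod.snd he⟩
  have hdist0 : pvGet2 (pvSet2 (List.replicate h_.toNat
      (List.replicate w.toNat (none : Option Int))) s1 s2 (some 0)) none s1 s2 = some 0 := by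
    rw [pvGet2_set2 hrepo rfl rfl hsInR hsInR]
    simp
  have key := pvLevel_sim h_ w town (PySem.Int.toStr c) (h_.toNat * w.toNat)
    [((s1 : Int), (s2 : Int))] (h_.toNat * w.toNat + 1) [] _ _
    [((s1 : Int), (s2 : Int))] 0 hvshape hdshape hseen (by simp)
    (by
      intro p hp
      rw [List.mem_singleton] at hp
      subst hp
      exact hsInR)
    (by intro p hp; exact hp)
    (by simp)
    (by
      intro p hp
      rw [List.mem_singleton] at hp
      subst hp
      exact hdist0)
    (by simp)
    (by simp only [List.length_cons, List.length_nil]; omega)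
    (by simp only [List.length_cons, List.length_nil]; omega)
  obtain ⟨keq, kinr⟩ := key
  rw [List.append_nil] at keq kinr
  have hofl : PySem.Set.ofList [((s1 : Int), (s2 : Int))] = [((s1 : Int), (s2 : Int))] := by
    apply PySem.Set.ofList_eq_self_of_nodup
    simp
  have hBun : pvBfsB h_ w town (PySem.Int.toStr c) (h_.toNat * w.toNat + 1)
      [((s1 : Int), (s2 : Int))] [((s1 : Int), (s2 : Int))] 0
      = match pvLevelB h_ w town (PySem.Int.toStr c) [((s1 : Int), (s2 : Int))]
          [((s1 : Int), (s2 : Int))] [] with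
        | (some f, _, _) => some (f, (0 : Int) + 1)
        | (none, seen', nxt') =>
            pvBfsB h_ w town (PySem.Int.toStr c) (h_.toNat * w.toNat) nxt' seen' ((0 : Int) + 1) := by
    simp only [pvBfsB]
  have hmain : pvBfsA h_ w town (PySem.Int.toStr c) (h_.toNat * w.toNat + 1)
      [((s1 : Int), (s2 : Int))]
      (pvSet2 (List.replicate h_.toNat (List.replicate w.toNat false)) s1 s2 true)
      (pvSet2 (List.replicate h_.toNat (List.replicate w.toNat (none : Option Int))) s1 s2
        (some 0))
      = pvBfsB h_ w town (PySem.Int.toStr c) (h_.toNat * w.toNat + 1)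
          [((s1 : Int), (s2 : Int))] [((s1 : Int), (s2 : Int))] 0 := by
    rw [keq, hBun]
  constructor
  · simp only [pvIterA, pvIterB, hofl]
    rw [hmain]
  · simp only [pvIterA]
    cases hE : pvBfsA h_ w town (PySem.Int.toStr c) (h_.toNat * w.toNat + 1)
        [((s1 : Int), (s2 : Int))]
        (pvSet2 (List.replicate h_.toNat (List.replicate w.toNat false)) s1 s2 true)
        (pvSet2 (List.replicate h_.toNat (List.replicate w.toNat (none : Option Int))) s1 s2
          (some 0)) with
    | none => simpa [hE] using hsInR
    | some r =>
      obtain ⟨f, dd⟩ := r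
      simpa [hE] using kinr f dd hE

theorem pvFold_sim (h_ w : Int) (town : List (List String)) :
    ∀ (cs : List Int) (st : (Int × Int) × Int), pvInR h_ w st.1 →
    cs.foldl (pvIterA h_ w town) st = cs.foldl (pvIterB h_ w town) st := by
  intro cs
  induction cs with
  | nil => intro st h; rfl
  | cons c cs ih =>
    intro st h
    obtain ⟨heq, hin⟩ := pvIter_sim h_ w town c st h
    simp only [List.foldl_cons]
    rw [← heq]
    exact ih _ hin

-- ===== VERDICT (by name: the statement is the Claim_ definition above) =====
theorem search_spec : Claim_equal_search := by
  intro h_ w n town start hdom hpre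
  unfold Spec_search search search_alt
  rcases hpre with hn | hok
  · rw [PySem.List.pyRange_one_eq_nil (by omega)]
    rfl
  · rw [pvFold_sim h_ w town _ (start, 0) ⟨hok.1, hok.2.1, hok.2.2.1, hok.2.2.2.1⟩]
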